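-- pv_equiv track=rewrite | github.com/abergasov/gb_python | 5/5.py | get_digits_from_str
-- ===== SOURCE A (Python) =====
-- def get_digits_from_str(line):
--     res = []
--     for i in line.split():
--         num = ''
--         for j in i:
--             if j.isnumeric() is not True:
--                 continue
--             num += j
--         if len(num) > 0:
--             res.append(int(num))
--     return res
-- ===== SOURCE B (Python) =====
-- def get_digits_from_str(line):
--     res = []
--     buf = ''
--     for ch in line:
--         if ch.isnumeric():
--             buf += ch
--         elif ch.isspace():
--             if buf:
--                 res.append(int(buf))
--             buf = ''
--     if buf:
--         res.append(int(buf))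
--     return res
-- ===== Notes on version B (the rewrite author's own statement) =====
-- stated objective: alternative
-- what changed: Replaces split()-then-nested-loop with a single left-to-right character scan that keeps a digit buffer and flushes it on whitespace and at end of line.
import Mathlib
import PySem

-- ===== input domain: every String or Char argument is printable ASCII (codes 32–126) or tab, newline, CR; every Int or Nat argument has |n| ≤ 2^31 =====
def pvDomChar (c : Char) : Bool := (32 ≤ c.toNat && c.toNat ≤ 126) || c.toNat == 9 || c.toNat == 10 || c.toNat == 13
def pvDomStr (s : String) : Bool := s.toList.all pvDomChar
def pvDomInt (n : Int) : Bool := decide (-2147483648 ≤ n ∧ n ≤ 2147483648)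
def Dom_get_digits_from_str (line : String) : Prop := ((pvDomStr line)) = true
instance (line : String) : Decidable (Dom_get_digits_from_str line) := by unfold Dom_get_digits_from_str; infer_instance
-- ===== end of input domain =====

-- B replaces A's split()-then-nested-loop with a single character scan keeping a digit buffer
-- flushed on whitespace and at end of line (objective: alternative decomposition, same cost).

-- ===== PORT A =====
-- A-side helper: the body of A's outer loop over the words of line.split().
-- '.isnumeric()' is ported as PySem.Chars.isdigit — exact on the printable-ASCII domain Dom,
-- where the numeric characters are exactly '0'..'9' (and int() on them never raises,
-- so ofChars? is some and .getD 0 is never the default).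
def pvAStep (res : List Int) (i : List Char) : List Int :=
  let num := i.foldl (fun num j => if PySem.Chars.isdigit j ≠ true then num else num ++ [j]) []
  if num.length > 0 then res ++ [(PySem.Int.ofChars? num).getD 0] else res

def get_digits_from_str (line : String) : List Int :=
  (PySem.Str.split₀ line).foldl (fun res i => pvAStep res i.toList) []

-- ===== PORT B =====
-- B-side helper: one scan step over a character (state = (res, buf)).
def pvBStep (p : List Int × List Char) (ch : Char) : List Int × List Char :=
  if PySem.Chars.isdigit ch then (p.1, p.2 ++ [ch])
  else if PySem.Chars.isspace ch then
    ((if p.2.isEmpty then p.1 else p.1 ++ [(PySem.Int.ofChars? p.2).getD 0]), [])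
  else p

-- B-side helper: the final flush of a nonempty buffer.
def pvBFlush (p : List Int × List Char) : List Int :=
  if p.2.isEmpty then p.1 else p.1 ++ [(PySem.Int.ofChars? p.2).getD 0]

def get_digits_from_str_alt (line : String) : List Int :=
  pvBFlush (line.toList.foldl pvBStep ([], []))

-- ===== PRECONDITION & SPEC =====
def Spec_get_digits_from_str (line : String) (out : List Int) : Prop := out = get_digits_from_str_alt line
instance (line : String) (out : List Int) : Decidable (Spec_get_digits_from_str line out) := by unfold Spec_get_digits_from_str; infer_instance

-- ===== CLAIM (what is proved, stated in full; the proofs are below) =====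
def Claim_equal_get_digits_from_str : Prop := ∀ (line : String), Dom_get_digits_from_str line → Spec_get_digits_from_str line (get_digits_from_str line)


-- ===== LEMMAS AND PROOFS =====

-- a digit character is never whitespace
lemma pv_digit_not_space (c : Char) (h : PySem.Chars.isdigit c = true) :
    PySem.Chars.isspace c = false := by
  rw [Bool.eq_false_iff]
  intro hs
  simp [PySem.Chars.isdigit, PySem.Chars.isspace, Char.le_def, UInt32.le_iff_toNat_le] at h hs
  have hc : c.toNat = c.val.toNat := rfl
  have h0 : '0'.val.toNat = 48 := rfl
  have h9 : '9'.val.toNat = 57 := rfl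
  omega

-- A's inner loop collects exactly the digit characters of the word
lemma pv_inner_eq (tok : List Char) :
    tok.foldl (fun num j => if PySem.Chars.isdigit j ≠ true then num else num ++ [j]) [] =
      tok.filter PySem.Chars.isdigit := by
  have h : (fun (num : List Char) j => if PySem.Chars.isdigit j ≠ true then num else num ++ [j]) =
      (fun num j => if PySem.Chars.isdigit j = true then num ++ [j] else num) := by
    funext num j; by_cases hj : PySem.Chars.isdigit j <;> simp [hj]
  rw [h, PySem.List.foldl_append_if_eq_filter]
  simp

-- flushing a buffer that holds the digits of word tok is A's step on tok
lemma pv_flush_step (res : List Int) (tok : List Char) :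
    pvBFlush (res, tok.filter PySem.Chars.isdigit) = pvAStep res tok := by
  simp only [pvBFlush, pvAStep]
  rw [pv_inner_eq]
  rcases h : tok.filter PySem.Chars.isdigit with _ | ⟨x, xs⟩ <;> simp

-- split₀.go's accumulator factors out in front
lemma pv_go_append (cs cur : List Char) (acc : List (List Char)) :
    PySem.Chars.split₀.go cs cur acc = acc.reverse ++ PySem.Chars.split₀.go cs cur [] := by
  induction cs generalizing cur acc with
  | nil => by_cases h : cur.isEmpty <;> simp [PySem.Chars.split₀.go, h]
  | cons c rest ih =>
    by_cases hs : PySem.Chars.isspace c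
    · by_cases he : cur.isEmpty
      · simp only [PySem.Chars.split₀.go, hs, ite_true, he]
        exact ih [] acc
      · simp only [PySem.Chars.split₀.go, hs, ite_true, he]
        rw [ih [] (cur.reverse :: acc), ih [] [cur.reverse]]
        simp
    · simp only [PySem.Chars.split₀.go, hs]
      exact ih (c :: cur) acc

-- main invariant: B's scan from state (res, digits of the current partial word cur)
-- computes A's fold over the remaining words
lemma pv_main (cs : List Char) (cur : List Char) (res : List Int) :
    pvBFlush (cs.foldl pvBStep (res, cur.reverse.filter PySem.Chars.isdigit)) =
      (PySem.Chars.split₀.go cs cur []).foldl pvAStep res := by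
  induction cs generalizing cur res with
  | nil =>
    simp only [List.foldl_nil]
    by_cases he : cur.isEmpty
    · have hc : cur = [] := List.isEmpty_iff.mp he
      subst hc
      simp [PySem.Chars.split₀.go, pvBFlush]
    · rw [pv_flush_step]
      simp [PySem.Chars.split₀.go, he]
  | cons c rest ih =>
    simp only [List.foldl_cons]
    by_cases hd : PySem.Chars.isdigit c
    · have hstep : pvBStep (res, List.filter PySem.Chars.isdigit cur.reverse) c =
          (res, List.filter PySem.Chars.isdigit (c :: cur).reverse) := by
        simp [pvBStep, hd, List.filter_append]
      rw [hstep, ih]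
      have hs := pv_digit_not_space c hd
      simp [PySem.Chars.split₀.go, hs]
    · by_cases hs : PySem.Chars.isspace c
      · have hstep : pvBStep (res, List.filter PySem.Chars.isdigit cur.reverse) c =
            (pvAStep res cur.reverse, List.filter PySem.Chars.isdigit ([] : List Char).reverse) := by
          rw [← pv_flush_step res cur.reverse]
          simp [pvBStep, pvBFlush, hd, hs]
        rw [hstep, ih]
        by_cases he : cur.isEmpty
        · have hc : cur = [] := List.isEmpty_iff.mp he
          subst hc
          simp [PySem.Chars.split₀.go, hs, pvAStep]
        · simp only [PySem.Chars.split₀.go, hs, ite_true, he]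
          rw [pv_go_append rest [] [cur.reverse]]
          simp
      · have hstep : pvBStep (res, List.filter PySem.Chars.isdigit cur.reverse) c =
            (res, List.filter PySem.Chars.isdigit (c :: cur).reverse) := by
          simp [pvBStep, hd, hs, List.filter_append]
        rw [hstep, ih]
        simp [PySem.Chars.split₀.go, hs]

-- ===== VERDICT (by name: the statement is the Claim_ definition above) =====
theorem get_digits_from_str_spec : Claim_equal_get_digits_from_str := by
  intro line _
  unfold Spec_get_digits_from_str get_digits_from_str get_digits_from_str_alt
  have hA : (PySem.Str.split₀ line).foldl (fun res i => pvAStep res i.toList) [] =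
      (PySem.Chars.split₀ line.toList).foldl pvAStep [] := by
    rw [← PySem.Str.split₀_map_toList, List.foldl_map]
  rw [hA]
  have := pv_main line.toList [] []
  simpa [PySem.Chars.split₀] using this.symm
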